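-- pv_equiv track=rewrite | github.com/ChanyutJean/2110327-AlgoDesign | Solutions/matmod.py | mn
-- ===== SOURCE A (Python) =====
-- def mn(n, a, b, k):
--     if n == 1:
--         return a
--     a1 = [i%k for i in a]
--     b1 = [i%k for i in b]
--     c1 = [a1[0]*b1[0] + a1[1]*b1[2],
--           a1[0]*b1[1] + a1[1]*b1[3],
--           a1[2]*b1[0] + a1[3]*b1[2],
--           a1[2]*b1[1] + a1[3]*b1[3]]
--     return mn(n-1, [i%k for i in c1], b, k)
-- ===== SOURCE B (Python) =====
-- def mn(n, a, b, k):
--     if n == 1: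
--         return a
--
--     def mul(x, y):
--         return [(x[0] * y[0] + x[1] * y[2]) % k,
--                 (x[0] * y[1] + x[1] * y[3]) % k,
--                 (x[2] * y[0] + x[3] * y[2]) % k,
--                 (x[2] * y[1] + x[3] * y[3]) % k]
--
--     r = [a[0] % k, a[1] % k, a[2] % k, a[3] % k]
--     p = [b[0] % k, b[1] % k, b[2] % k, b[3] % k]
--     e = n - 1
--     while e:
--         if e % 2:
--             r = mul(r, p)
--         p = mul(p, p)
--         e //= 2
--     return r
-- ===== Notes on version B (the rewrite author's own statement) =====
-- stated objective: faster
-- what changed: Replaces A's n-1 successive (a*b mod k) 2x2 multiplications (one per recursive call) by binary exponentiation: square-and-multiply on b with every entry reduced mod k, O(log n) multiplications.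
-- outside the precondition, e.g. on mn(950, [1, 0, 0, 1], [1, 1, 0, 1], 5): A returns [1, 4, 0, 1], B returns [1, 4, 0, 1]
import Mathlib
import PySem

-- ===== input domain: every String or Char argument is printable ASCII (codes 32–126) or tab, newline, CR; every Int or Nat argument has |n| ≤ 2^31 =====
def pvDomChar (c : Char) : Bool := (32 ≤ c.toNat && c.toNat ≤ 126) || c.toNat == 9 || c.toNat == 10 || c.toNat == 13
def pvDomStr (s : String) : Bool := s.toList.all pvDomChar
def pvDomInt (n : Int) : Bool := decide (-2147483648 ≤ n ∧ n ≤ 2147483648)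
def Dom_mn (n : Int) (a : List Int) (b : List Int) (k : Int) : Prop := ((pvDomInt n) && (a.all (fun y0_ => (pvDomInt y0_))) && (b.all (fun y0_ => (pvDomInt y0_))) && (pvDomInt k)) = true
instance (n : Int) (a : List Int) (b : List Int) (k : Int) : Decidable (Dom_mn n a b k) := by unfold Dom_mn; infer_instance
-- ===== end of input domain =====

-- B replaces A's n-1 successive (a·b mod k) multiplications by binary exponentiation
-- (square-and-multiply) on b, O(log n) 2x2 modular multiplications instead of O(n).

-- ===== PORT A =====

-- total form of `l[i]`: under Pre_ every index used is in range, so the default is never taken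
def pvGet (l : List Int) (i : Int) : Int := (PySem.List.pyGet? l i).getD 0

-- the recursion of A, on a Nat fuel equal to the Python n (fuel 0, i.e. n ≤ 0 where
-- Python recurses forever, is excluded by Pre_ and returns a only for totality)
def mnGo : Nat → List Int → List Int → Int → List Int
  | 0, a, _, _ => a
  | 1, a, _, _ => a
  | (m+2), a, b, k =>
    let a1 := a.map (fun i => PySem.Int.mod i k)
    let b1 := b.map (fun i => PySem.Int.mod i k)
    let c1 := [pvGet a1 0 * pvGet b1 0 + pvGet a1 1 * pvGet b1 2,
               pvGet a1 0 * pvGet b1 1 + pvGet a1 1 * pvGet b1 3,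
               pvGet a1 2 * pvGet b1 0 + pvGet a1 3 * pvGet b1 2,
               pvGet a1 2 * pvGet b1 1 + pvGet a1 3 * pvGet b1 3]
    mnGo (m+1) (c1.map (fun i => PySem.Int.mod i k)) b k

def mn (n : Int) (a : List Int) (b : List Int) (k : Int) : List Int := mnGo n.toNat a b k

-- ===== PORT B =====

-- Source B's `mul(x, y)`: 2x2 product with every entry reduced mod k
def pvMulMod (x y : List Int) (k : Int) : List Int :=
  [PySem.Int.mod (pvGet x 0 * pvGet y 0 + pvGet x 1 * pvGet y 2) k,
   PySem.Int.mod (pvGet x 0 * pvGet y 1 + pvGet x 1 * pvGet y 3) k,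
   PySem.Int.mod (pvGet x 2 * pvGet y 0 + pvGet x 3 * pvGet y 2) k,
   PySem.Int.mod (pvGet x 2 * pvGet y 1 + pvGet x 3 * pvGet y 3) k]

-- Source B's `while e:` loop; the guard 0 < e makes it total (Python loops forever for e < 0,
-- excluded by Pre_; for e = 0 both return r)
def pvBinPow (e : Int) (r p : List Int) (k : Int) : List Int :=
  if _h : 0 < e then
    let r' := if PySem.Int.mod e 2 ≠ 0 then pvMulMod r p k else r
    pvBinPow (PySem.Int.floordiv e 2) r' (pvMulMod p p k) k
  else r
termination_by e.toNat
decreasing_by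
  rw [PySem.Int.floordiv_eq_ediv_of_pos (by omega : (0:Int) < 2)]
  omega

def mn_alt (n : Int) (a : List Int) (b : List Int) (k : Int) : List Int :=
  if n = 1 then a
  else
    let r := [PySem.Int.mod (pvGet a 0) k, PySem.Int.mod (pvGet a 1) k,
              PySem.Int.mod (pvGet a 2) k, PySem.Int.mod (pvGet a 3) k]
    let p := [PySem.Int.mod (pvGet b 0) k, PySem.Int.mod (pvGet b 1) k,
              PySem.Int.mod (pvGet b 2) k, PySem.Int.mod (pvGet b 3) k]
    pvBinPow (n - 1) r p k

-- ===== PRECONDITION & SPEC =====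
-- Pre_ excludes exactly the inputs where the Python A raises or never returns: n < 1
-- (unbounded recursion, RecursionError), n > 900 (the recursion n → n-1 exceeds CPython's
-- default recursion limit of 1000 — the bound is conservative, since inputs with
-- 900 < n < the exact, environment-dependent limit still return), and, for n ≥ 2,
-- k = 0 (ZeroDivisionError) or a list of fewer than 4 entries (IndexError).
def Pre_mn (n : Int) (a : List Int) (b : List Int) (k : Int) : Prop :=
  1 ≤ n ∧ n ≤ 900 ∧ (n = 1 ∨ (k ≠ 0 ∧ 4 ≤ a.length ∧ 4 ≤ b.length))
instance (n : Int) (a : List Int) (b : List Int) (k : Int) : Decidable (Pre_mn n a b k) := by unfold Pre_mn; infer_instance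

def pvWitness_mn : Int × List Int × List Int × Int := (3, [1, 2, 3, 4], [5, 6, 7, 8], 13)

def Spec_mn (n : Int) (a : List Int) (b : List Int) (k : Int) (out : List Int) : Prop := out = mn_alt n a b k
instance (n : Int) (a : List Int) (b : List Int) (k : Int) (out : List Int) : Decidable (Spec_mn n a b k out) := by unfold Spec_mn; infer_instance

-- ===== CLAIM (what is proved, stated in full; the proofs are below) =====
def Claim_equal_mn : Prop := ∀ (n : Int) (a : List Int) (b : List Int) (k : Int), Dom_mn n a b k → Pre_mn n a b k → Spec_mn n a b k (mn n a b k)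

-- ===== LEMMAS AND PROOFS =====

-- 2x2 integer matrices as a flat quadruple
structure M2 where
  a : Int
  b : Int
  c : Int
  d : Int
deriving DecidableEq, Repr

def m2mul (x y : M2) : M2 :=
  ⟨x.a * y.a + x.b * y.c, x.a * y.b + x.b * y.d,
   x.c * y.a + x.d * y.c, x.c * y.b + x.d * y.d⟩

def m2pow (x : M2) : Nat → M2
  | 0 => ⟨1, 0, 0, 1⟩
  | m + 1 => m2mul (m2pow x m) x

def m2red (k : Int) (x : M2) : M2 :=
  ⟨PySem.Int.mod x.a k, PySem.Int.mod x.b k, PySem.Int.mod x.c k, PySem.Int.mod x.d k⟩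

def m2cong (k : Int) (x y : M2) : Prop :=
  x.a ≡ y.a [ZMOD k] ∧ x.b ≡ y.b [ZMOD k] ∧ x.c ≡ y.c [ZMOD k] ∧ x.d ≡ y.d [ZMOD k]

def ofM (x : M2) : List Int := [x.a, x.b, x.c, x.d]

-- scalar facts about Python's % (Int.fmod)
lemma pvmod_congr (x k : Int) : PySem.Int.mod x k ≡ x [ZMOD k] := by
  rw [Int.modEq_iff_dvd]
  have h := Int.fmod_add_mul_fdiv x k
  exact ⟨x.fdiv k, by simp [PySem.Int.mod] at *; omega⟩

lemma pvmod_eq_of_congr {x y k : Int} (h : x ≡ y [ZMOD k]) :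
    PySem.Int.mod x k = PySem.Int.mod y k := by
  simp only [PySem.Int.mod]
  rw [Int.fmod_eq_fmod_iff_fmod_sub_eq_zero]
  have : k ∣ x - y := (Int.modEq_iff_dvd.mp h.symm)
  simpa [PySem.Int.mod] using (PySem.Int.mod_eq_zero_iff_dvd (x - y) k).mpr this

-- matrix algebra
lemma m2mul_assoc (x y z : M2) : m2mul (m2mul x y) z = m2mul x (m2mul y z) := by
  cases x; cases y; cases z
  simp only [m2mul, M2.mk.injEq]
  refine ⟨by ring, by ring, by ring, by ring⟩

lemma m2one_mul (x : M2) : m2mul ⟨1, 0, 0, 1⟩ x = x := by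
  cases x; simp [m2mul]

lemma m2mul_one (x : M2) : m2mul x ⟨1, 0, 0, 1⟩ = x := by
  cases x; simp [m2mul]

lemma m2pow_one (x : M2) : m2pow x 1 = x := by
  simp [m2pow, m2one_mul]

lemma m2pow_add (x : M2) (m n : Nat) :
    m2pow x (m + n) = m2mul (m2pow x m) (m2pow x n) := by
  induction n with
  | zero => simp [m2pow, m2mul_one]
  | succ n ih => rw [← Nat.add_assoc, m2pow, m2pow, ih, m2mul_assoc]

lemma m2pow_sq (x : M2) (q : Nat) : m2pow (m2mul x x) q = m2pow x (2 * q) := by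
  induction q with
  | zero => simp [m2pow]
  | succ q ih =>
    have h2 : m2pow x 2 = m2mul x x := by
      show m2mul (m2pow x 1) x = m2mul x x
      rw [m2pow_one]
    rw [m2pow, ih, Nat.mul_add, Nat.mul_one, m2pow_add, h2]

-- congruence machinery
lemma m2cong_refl (k : Int) (x : M2) : m2cong k x x :=
  ⟨Int.ModEq.refl _, Int.ModEq.refl _, Int.ModEq.refl _, Int.ModEq.refl _⟩

lemma m2cong_red (k : Int) (x : M2) : m2cong k (m2red k x) x :=
  ⟨pvmod_congr _ _, pvmod_congr _ _, pvmod_congr _ _, pvmod_congr _ _⟩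

lemma m2cong_mul {k : Int} {x x' y y' : M2} (hx : m2cong k x x') (hy : m2cong k y y') :
    m2cong k (m2mul x y) (m2mul x' y') := by
  obtain ⟨ha, hb, hc, hd⟩ := hx
  obtain ⟨ha', hb', hc', hd'⟩ := hy
  exact ⟨(ha.mul ha').add (hb.mul hc'), (ha.mul hb').add (hb.mul hd'),
         (hc.mul ha').add (hd.mul hc'), (hc.mul hb').add (hd.mul hd')⟩

lemma m2red_eq_of_cong {k : Int} {x y : M2} (h : m2cong k x y) : m2red k x = m2red k y := by
  obtain ⟨ha, hb, hc, hd⟩ := h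
  simp only [m2red, M2.mk.injEq]
  exact ⟨pvmod_eq_of_congr ha, pvmod_eq_of_congr hb, pvmod_eq_of_congr hc, pvmod_eq_of_congr hd⟩

lemma m2red_mul_red_left (k : Int) (x y : M2) :
    m2red k (m2mul (m2red k x) y) = m2red k (m2mul x y) :=
  m2red_eq_of_cong (m2cong_mul (m2cong_red k x) (m2cong_refl k y))

lemma m2red_mul_red_red (k : Int) (x y : M2) :
    m2red k (m2mul (m2red k x) (m2red k y)) = m2red k (m2mul x y) :=
  m2red_eq_of_cong (m2cong_mul (m2cong_red k x) (m2cong_red k y))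

lemma pvGet_eq (l : List Int) (i : Nat) (h : i < l.length) : pvGet l (i : Int) = l[i] := by
  simp [pvGet, PySem.List.pyGet?_natCast, List.getElem?_eq_getElem h]

@[simp] lemma pvGet_c0 (x0 x1 x2 x3 : Int) (t : List Int) : pvGet (x0 :: x1 :: x2 :: x3 :: t) 0 = x0 := by
  simpa using pvGet_eq (x0 :: x1 :: x2 :: x3 :: t) 0 (by simp)
@[simp] lemma pvGet_c1 (x0 x1 x2 x3 : Int) (t : List Int) : pvGet (x0 :: x1 :: x2 :: x3 :: t) 1 = x1 := by
  simpa using pvGet_eq (x0 :: x1 :: x2 :: x3 :: t) 1 (by simp)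
@[simp] lemma pvGet_c2 (x0 x1 x2 x3 : Int) (t : List Int) : pvGet (x0 :: x1 :: x2 :: x3 :: t) 2 = x2 := by
  simpa using pvGet_eq (x0 :: x1 :: x2 :: x3 :: t) 2 (by simp)
@[simp] lemma pvGet_c3 (x0 x1 x2 x3 : Int) (t : List Int) : pvGet (x0 :: x1 :: x2 :: x3 :: t) 3 = x3 := by
  simpa using pvGet_eq (x0 :: x1 :: x2 :: x3 :: t) 3 (by simp)

-- the characterisation of A's recursion: fuel m+2 computes a·b^(m+1), entrywise mod k
lemma mnGo_char (k : Int) (m : Nat) (x : M2) (ta : List Int)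
    (B : M2) (tb : List Int) :
    mnGo (m + 2) (x.a :: x.b :: x.c :: x.d :: ta) (B.a :: B.b :: B.c :: B.d :: tb) k
      = ofM (m2red k (m2mul x (m2pow B (m + 1)))) := by
  induction m generalizing x ta with
  | zero =>
    have lhs : mnGo 2 (x.a :: x.b :: x.c :: x.d :: ta) (B.a :: B.b :: B.c :: B.d :: tb) k
        = ofM (m2red k (m2mul (m2red k x) (m2red k B))) := by
      simp [mnGo, ofM, m2mul, m2red]
    rw [lhs, m2red_mul_red_red, m2pow_one]
  | succ m ih =>
    have step : mnGo (m + 3) (x.a :: x.b :: x.c :: x.d :: ta) (B.a :: B.b :: B.c :: B.d :: tb) k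
        = mnGo (m + 2) (ofM (m2red k (m2mul (m2red k x) (m2red k B)))) (B.a :: B.b :: B.c :: B.d :: tb) k := by
      simp only [mnGo, List.map_cons, pvGet_c0, pvGet_c1, pvGet_c2, pvGet_c3, ofM, m2mul, m2red]
    rw [step, m2red_mul_red_red]
    have hred : ∀ y : M2, ofM y = y.a :: y.b :: y.c :: y.d :: ([] : List Int) := fun y => rfl
    rw [hred (m2red k (m2mul x B))]
    rw [ih (m2red k (m2mul x B)) []]
    rw [m2red_mul_red_left]
    congr 1
    rw [m2mul_assoc]
    congr 1
    show m2mul x (m2mul B (m2pow B (m+1))) = m2mul x (m2pow B (m+2))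
    congr 1
    have : m2pow B (m + 2) = m2mul (m2pow B 1) (m2pow B (m + 1)) := by
      rw [← m2pow_add]; congr 1; omega
    rw [this, m2pow_one]

-- pvMulMod on canonical quadruples is red∘mul
lemma pvMulMod_char (k : Int) (u v : M2) :
    pvMulMod (ofM u) (ofM v) k = ofM (m2red k (m2mul u v)) := rfl

-- the characterisation of B's loop
lemma pvBinPow_char (k : Int) (e : Nat) (x y : M2) :
    pvBinPow (e : Int) (ofM (m2red k x)) (ofM (m2red k y)) k
      = ofM (m2red k (m2mul x (m2pow y e))) := by
  induction e using Nat.strong_induction_on generalizing x y with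
  | _ e ih =>
    rw [pvBinPow]
    by_cases he : 0 < e
    · have hpos : (0:Int) < (e:Int) := by exact_mod_cast he
      rw [dif_pos hpos]
      have hmod : PySem.Int.mod (e : Int) 2 = ((e % 2 : Nat) : Int) := PySem.Int.mod_natCast e 2
      have hdiv : PySem.Int.floordiv (e : Int) 2 = ((e / 2 : Nat) : Int) := PySem.Int.floordiv_natCast e 2
      simp only [hmod, hdiv]
      have hr' : (if ((e % 2 : Nat) : Int) ≠ 0 then pvMulMod (ofM (m2red k x)) (ofM (m2red k y)) k
                   else ofM (m2red k x)) = ofM (m2red k (m2mul x (m2pow y (e % 2)))) := by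
        rcases Nat.even_or_odd e with hev | hod
        · have h0 : e % 2 = 0 := Nat.even_iff.mp hev
          rw [if_neg (by simp [h0]), h0]
          simp [m2pow, m2mul_one]
        · have h1 : e % 2 = 1 := Nat.odd_iff.mp hod
          rw [if_pos (by simp [h1]), h1, pvMulMod_char, m2pow_one]
          rw [m2red_mul_red_red]
      rw [hr', pvMulMod_char, m2red_mul_red_red]
      rw [ih (e / 2) (Nat.div_lt_self he (by omega)) (m2mul x (m2pow y (e % 2))) (m2mul y y)]
      congr 2
      rw [m2pow_sq, m2mul_assoc, ← m2pow_add]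
      congr 1
      congr 1
      omega
    · have : e = 0 := by omega
      subst this
      rw [dif_neg (by simp)]
      simp [m2pow, m2mul_one]

-- ===== VERDICT (by name: the statement is the Claim_ definition above) =====
theorem mn_spec : Claim_equal_mn := by
  intro n a b k _ hpre
  unfold Spec_mn
  obtain ⟨h1, h900, hrest⟩ := hpre
  by_cases hn1 : n = 1
  · subst hn1
    simp [mn, mnGo, mn_alt]
  · rcases hrest with rfl | ⟨hk, ha, hb⟩
    · exact absurd rfl hn1
    have hn2 : 2 ≤ n := by omega
    obtain ⟨a0, a1, a2, a3, ta, rfl⟩ : ∃ a0 a1 a2 a3 ta, a = a0 :: a1 :: a2 :: a3 :: ta := by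
      match a, ha with
      | a0 :: a1 :: a2 :: a3 :: ta, _ => exact ⟨a0, a1, a2, a3, ta, rfl⟩
    obtain ⟨b0, b1, b2, b3, tb, rfl⟩ : ∃ b0 b1 b2 b3 tb, b = b0 :: b1 :: b2 :: b3 :: tb := by
      match b, hb with
      | b0 :: b1 :: b2 :: b3 :: tb, _ => exact ⟨b0, b1, b2, b3, tb, rfl⟩
    -- A side
    set m : Nat := n.toNat - 2 with hm
    have hfuel : n.toNat = m + 2 := by omega
    have hA : mn n (a0 :: a1 :: a2 :: a3 :: ta) (b0 :: b1 :: b2 :: b3 :: tb) k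
        = ofM (m2red k (m2mul ⟨a0, a1, a2, a3⟩ (m2pow ⟨b0, b1, b2, b3⟩ (m + 1)))) := by
      rw [mn, hfuel]
      exact mnGo_char k m ⟨a0, a1, a2, a3⟩ ta ⟨b0, b1, b2, b3⟩ tb
    -- B side
    have hB : mn_alt n (a0 :: a1 :: a2 :: a3 :: ta) (b0 :: b1 :: b2 :: b3 :: tb) k
        = ofM (m2red k (m2mul ⟨a0, a1, a2, a3⟩ (m2pow ⟨b0, b1, b2, b3⟩ (m + 1)))) := by
      rw [mn_alt, if_neg hn1]
      have hcast : n - 1 = ((m + 1 : Nat) : Int) := by push_cast; omega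
      have hr : [PySem.Int.mod (pvGet (a0 :: a1 :: a2 :: a3 :: ta) 0) k,
                 PySem.Int.mod (pvGet (a0 :: a1 :: a2 :: a3 :: ta) 1) k,
                 PySem.Int.mod (pvGet (a0 :: a1 :: a2 :: a3 :: ta) 2) k,
                 PySem.Int.mod (pvGet (a0 :: a1 :: a2 :: a3 :: ta) 3) k]
          = ofM (m2red k ⟨a0, a1, a2, a3⟩) := by simp [ofM, m2red]
      have hp : [PySem.Int.mod (pvGet (b0 :: b1 :: b2 :: b3 :: tb) 0) k,
                 PySem.Int.mod (pvGet (b0 :: b1 :: b2 :: b3 :: tb) 1) k,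
                 PySem.Int.mod (pvGet (b0 :: b1 :: b2 :: b3 :: tb) 2) k,
                 PySem.Int.mod (pvGet (b0 :: b1 :: b2 :: b3 :: tb) 3) k]
          = ofM (m2red k ⟨b0, b1, b2, b3⟩) := by simp [ofM, m2red]
      simp only [hr, hp, hcast]
      exact pvBinPow_char k (m + 1) ⟨a0, a1, a2, a3⟩ ⟨b0, b1, b2, b3⟩
    rw [hA, hB]
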